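-- pv_equiv track=rewrite | github.com/nkn162/AI_Robotic_Mascot_Persona_Engine | Code/src/qna.py | _structure_hint
-- ===== SOURCE A (Python) =====
-- def _structure_hint(question: str) -> str:
--     q = (question or "").lower()
--
--     if any(k in q for k in ("deserve", "xg", "overall", "performance", "better team")):
--         return ("Structure (plain prose): start with a one-line verdict, include one crisp stat if helpful, "
--                 "add a line of fan feeling, and finish with a tidy closer.")
--     if any(k in q for k in ("atmosphere", "weather", "crowd", "noise")):
--         return ("Structure (plain prose): open with understated scene-setting, add one vivid detail, "
--                 "nod to the fans, and close neatly.")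
--     if any(k in q for k in ("opponent", "their fans", "banter", "rivals")):
--         return ("Structure (plain prose): a polite jab, a fair acknowledgement, and a playful, clean sign-off.")
--     if any(k in q for k in ("nervy", "closing minutes", "hang on", "backs to the wall")):
--         return ("Structure (plain prose): admit the nerves, mention one concrete moment or stat, "
--                 "relief line, optimistic closer.")
--     if any(k in q for k in ("motm", "man of the match", "player of the match", "best player")):
--         return ("Structure (plain prose): name the pick, give one-sentence justification, "
--                 "offer a secondary shout-out, tidy closer.")
--     # Default
--     return ("Structure (plain prose): quick headline sentence, one key detail, one stylistic flourish, neat closer.")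
-- ===== SOURCE B (Python) =====
-- # B: flat keyword->priority map; one full pass computes the MINIMUM matching priority
-- # (order-independent, no early return), then a hint table is indexed by that priority.
--
-- _HINTS = [
--     ("Structure (plain prose): start with a one-line verdict, include one crisp stat if helpful, "
--      "add a line of fan feeling, and finish with a tidy closer."),
--     ("Structure (plain prose): open with understated scene-setting, add one vivid detail, "
--      "nod to the fans, and close neatly."),
--     ("Structure (plain prose): a polite jab, a fair acknowledgement, and a playful, clean sign-off."),
--     ("Structure (plain prose): admit the nerves, mention one concrete moment or stat, "
--      "relief line, optimistic closer."),
--     ("Structure (plain prose): name the pick, give one-sentence justification, "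
--      "offer a secondary shout-out, tidy closer."),
--     ("Structure (plain prose): quick headline sentence, one key detail, one stylistic flourish, neat closer."),
-- ]
--
-- _KEY_PRIORITY = {
--     "deserve": 0, "xg": 0, "overall": 0, "performance": 0, "better team": 0,
--     "atmosphere": 1, "weather": 1, "crowd": 1, "noise": 1,
--     "opponent": 2, "their fans": 2, "banter": 2, "rivals": 2,
--     "nervy": 3, "closing minutes": 3, "hang on": 3, "backs to the wall": 3,
--     "motm": 4, "man of the match": 4, "player of the match": 4, "best player": 4,
-- }
--
-- def _structure_hint(question: str) -> str:
--     q = (question or "").lower()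
--     best = len(_HINTS) - 1
--     for k, p in _KEY_PRIORITY.items():
--         if k in q:
--             best = min(best, p)
--     return _HINTS[best]
-- ===== Notes on version B (the rewrite author's own statement) =====
-- stated objective: alternative
-- what changed: Replaced the ordered first-match cascade over keyword groups by a flat keyword-to-priority map scanned in one full, order-independent pass that maintains a numeric minimum-priority accumulator and finally indexes a hint table by it.
import Mathlib
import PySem

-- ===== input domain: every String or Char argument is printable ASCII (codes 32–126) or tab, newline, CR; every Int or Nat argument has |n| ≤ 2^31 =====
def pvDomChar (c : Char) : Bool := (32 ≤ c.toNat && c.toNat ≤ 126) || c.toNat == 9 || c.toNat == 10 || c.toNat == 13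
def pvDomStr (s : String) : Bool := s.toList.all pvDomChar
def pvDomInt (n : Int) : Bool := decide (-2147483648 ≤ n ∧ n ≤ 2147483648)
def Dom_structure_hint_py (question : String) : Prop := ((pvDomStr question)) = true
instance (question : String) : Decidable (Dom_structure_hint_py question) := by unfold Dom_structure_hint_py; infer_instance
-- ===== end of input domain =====

-- B replaces the ordered first-match cascade by an order-independent minimum-priority
-- pass over a flat keyword->priority map plus a hint-table lookup (alternative algorithm, same cost).

-- ===== PORT A =====
def structure_hint_py (question : String) : String :=
  let q := PySem.Str.lower (if question = "" then "" else question)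
  if [("deserve" : String), "xg", "overall", "performance", "better team"].any
      (fun k => PySem.Str.isIn k q) then
    "Structure (plain prose): start with a one-line verdict, include one crisp stat if helpful, add a line of fan feeling, and finish with a tidy closer."
  else if [("atmosphere" : String), "weather", "crowd", "noise"].any
      (fun k => PySem.Str.isIn k q) then
    "Structure (plain prose): open with understated scene-setting, add one vivid detail, nod to the fans, and close neatly."
  else if [("opponent" : String), "their fans", "banter", "rivals"].any
      (fun k => PySem.Str.isIn k q) then
    "Structure (plain prose): a polite jab, a fair acknowledgement, and a playful, clean sign-off."
  else if [("nervy" : String), "closing minutes", "hang on", "backs to the wall"].any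
      (fun k => PySem.Str.isIn k q) then
    "Structure (plain prose): admit the nerves, mention one concrete moment or stat, relief line, optimistic closer."
  else if [("motm" : String), "man of the match", "player of the match", "best player"].any
      (fun k => PySem.Str.isIn k q) then
    "Structure (plain prose): name the pick, give one-sentence justification, offer a secondary shout-out, tidy closer."
  else
    "Structure (plain prose): quick headline sentence, one key detail, one stylistic flourish, neat closer."

-- ===== PORT B =====
def pvHints : List String :=
  [ "Structure (plain prose): start with a one-line verdict, include one crisp stat if helpful, add a line of fan feeling, and finish with a tidy closer.",
    "Structure (plain prose): open with understated scene-setting, add one vivid detail, nod to the fans, and close neatly.",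
    "Structure (plain prose): a polite jab, a fair acknowledgement, and a playful, clean sign-off.",
    "Structure (plain prose): admit the nerves, mention one concrete moment or stat, relief line, optimistic closer.",
    "Structure (plain prose): name the pick, give one-sentence justification, offer a secondary shout-out, tidy closer.",
    "Structure (plain prose): quick headline sentence, one key detail, one stylistic flourish, neat closer." ]

def pvKeyPriority : List (String × Nat) :=
  [ ("deserve", 0), ("xg", 0), ("overall", 0), ("performance", 0), ("better team", 0),
    ("atmosphere", 1), ("weather", 1), ("crowd", 1), ("noise", 1),
    ("opponent", 2), ("their fans", 2), ("banter", 2), ("rivals", 2),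
    ("nervy", 3), ("closing minutes", 3), ("hang on", 3), ("backs to the wall", 3),
    ("motm", 4), ("man of the match", 4), ("player of the match", 4), ("best player", 4) ]

def structure_hint_py_alt (question : String) : String :=
  let q := PySem.Str.lower (if question = "" then "" else question)
  let best := pvKeyPriority.foldl
    (fun best kp => if PySem.Str.isIn kp.1 q then min best kp.2 else best)
    (pvHints.length - 1)
  -- _HINTS[best]: best is always < pvHints.length, so the Python indexing never raises
  pvHints.getD best ""

-- ===== PRECONDITION & SPEC =====
def Spec_structure_hint_py (question : String) (out : String) : Prop := out = structure_hint_py_alt question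
instance (question : String) (out : String) : Decidable (Spec_structure_hint_py question out) := by unfold Spec_structure_hint_py; infer_instance

-- ===== CLAIM (what is proved, stated in full; the proofs are below) =====
def Claim_equal_structure_hint_py : Prop := ∀ (question : String), Dom_structure_hint_py question → Spec_structure_hint_py question (structure_hint_py question)

-- ===== LEMMAS AND PROOFS =====

-- folding the min-accumulator over a constant-priority segment = one `any` test
theorem pvSegFold (q : String) (ks : List String) (p : Nat) (acc : Nat) :
    (ks.map (fun k => (k, p))).foldl
      (fun best kp => if PySem.Str.isIn kp.1 q then min best kp.2 else best) acc
    = if ks.any (fun k => PySem.Str.isIn k q) then min acc p else acc := by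
  induction ks generalizing acc with
  | nil => simp
  | cons k ks ih =>
    simp only [List.map, List.foldl, List.any_cons]
    by_cases h : PySem.Str.isIn k q = true
    · rw [if_pos h, ih]
      simp only [h, Bool.true_or]
      split_ifs <;> omega
    · have h' : PySem.Str.isIn k q = false := by rwa [Bool.not_eq_true] at h
      rw [if_neg h, ih]
      simp only [h', Bool.false_or]

theorem pvKeyPriority_eq :
    pvKeyPriority =
      (["deserve", "xg", "overall", "performance", "better team"].map (fun k => (k, 0)))
      ++ (["atmosphere", "weather", "crowd", "noise"].map (fun k => (k, 1)))
      ++ (["opponent", "their fans", "banter", "rivals"].map (fun k => (k, 2)))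
      ++ (["nervy", "closing minutes", "hang on", "backs to the wall"].map (fun k => (k, 3)))
      ++ (["motm", "man of the match", "player of the match", "best player"].map (fun k => (k, 4))) := rfl

-- ===== VERDICT (by name: the statement is the Claim_ definition above) =====
theorem structure_hint_py_spec : Claim_equal_structure_hint_py := by
  intro question _
  unfold Spec_structure_hint_py structure_hint_py structure_hint_py_alt
  simp only [pvKeyPriority_eq, List.foldl_append, pvSegFold]
  generalize (["deserve", "xg", "overall", "performance", "better team"].any
      (fun k => PySem.Str.isIn k (PySem.Str.lower (if question = "" then "" else question)))) = b0
  generalize (["atmosphere", "weather", "crowd", "noise"].any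
      (fun k => PySem.Str.isIn k (PySem.Str.lower (if question = "" then "" else question)))) = b1
  generalize (["opponent", "their fans", "banter", "rivals"].any
      (fun k => PySem.Str.isIn k (PySem.Str.lower (if question = "" then "" else question)))) = b2
  generalize (["nervy", "closing minutes", "hang on", "backs to the wall"].any
      (fun k => PySem.Str.isIn k (PySem.Str.lower (if question = "" then "" else question)))) = b3
  generalize (["motm", "man of the match", "player of the match", "best player"].any
      (fun k => PySem.Str.isIn k (PySem.Str.lower (if question = "" then "" else question)))) = b4
  cases b0 <;> cases b1 <;> cases b2 <;> cases b3 <;> cases b4 <;> rfl
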